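-- pv_equiv track=rewrite | github.com/Avagenzo/levenshtein-recipe | custom_edit.py | calculate_weighted_levenshtein_distance
-- ===== SOURCE A (Python) =====
-- def weighted_levenshtein(str1, str2, delete_weight=1, insert_weight=1, substitute_weight=1):
--     len_str1 = len(str1)
--     len_str2 = len(str2)
--
--     # Create a distance matrix
--     matrix = [[0] * (len_str2 + 1) for _ in range(len_str1 + 1)]
--
--     # Initialize the base cases
--     for i in range(len_str1 + 1):
--         matrix[i][0] = i * delete_weight
--     for j in range(len_str2 + 1):
--         matrix[0][j] = j * insert_weight
--
--     # Fill in the matrix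
--     for i in range(1, len_str1 + 1):
--         for j in range(1, len_str2 + 1):
--             cost = 0 if str1[i - 1] == str2[j - 1] else substitute_weight
--             matrix[i][j] = min(
--                 matrix[i - 1][j] + delete_weight,  # Deletion
--                 matrix[i][j - 1] + insert_weight,  # Insertion
--                 matrix[i - 1][j - 1] + cost  # Substitution
--             )
--
--     return matrix[len_str1][len_str2]
--
-- def calculate_weighted_levenshtein_distance(list1, list2, delete_weight=1, insert_weight=1, substitute_weight=1):
--     total_distance = 0
--     for ingredient1 in list1:
--         closest_match = min(list2, key=lambda x: weighted_levenshtein(ingredient1, x,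
--                                                                       delete_weight,
--                                                                       insert_weight,
--                                                                       substitute_weight))
--         total_distance += weighted_levenshtein(ingredient1, closest_match,
--                                                delete_weight,
--                                                insert_weight,
--                                                substitute_weight)
--     return total_distance
-- ===== SOURCE B (Python) =====
-- def _ld(i, j, s1, s2, dw, iw, sw, memo):
--     # top-down memoized recursion over the two string indices
--     key = (i, j)
--     if key in memo:
--         return memo[key]
--     if i == 0:
--         v = j * iw
--     elif j == 0:
--         v = i * dw
--     else:
--         v = min(_ld(i - 1, j, s1, s2, dw, iw, sw, memo) + dw,
--                 _ld(i, j - 1, s1, s2, dw, iw, sw, memo) + iw,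
--                 _ld(i - 1, j - 1, s1, s2, dw, iw, sw, memo)
--                 + (0 if s1[i - 1] == s2[j - 1] else sw))
--     memo[key] = v
--     return v
--
--
-- def calculate_weighted_levenshtein_distance(list1, list2, delete_weight=1, insert_weight=1, substitute_weight=1):
--     total = 0
--     for w1 in list1:
--         total += min(_ld(len(w1), len(w2), w1, w2,
--                          delete_weight, insert_weight, substitute_weight, {})
--                      for w2 in list2)
--     return total
-- ===== Notes on version B (the rewrite author's own statement) =====
-- stated objective: alternative
-- what changed: B computes each edit distance by top-down memoized recursion over the two string indices (a dict of (i,j) keys filled on demand) instead of A's bottom-up (n1+1)x(n2+1) matrix fill, and drops A's min-by-key closest-match pass followed by a second full recomputation of the winner's distance, taking the min of the distance values directly.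
import Mathlib
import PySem

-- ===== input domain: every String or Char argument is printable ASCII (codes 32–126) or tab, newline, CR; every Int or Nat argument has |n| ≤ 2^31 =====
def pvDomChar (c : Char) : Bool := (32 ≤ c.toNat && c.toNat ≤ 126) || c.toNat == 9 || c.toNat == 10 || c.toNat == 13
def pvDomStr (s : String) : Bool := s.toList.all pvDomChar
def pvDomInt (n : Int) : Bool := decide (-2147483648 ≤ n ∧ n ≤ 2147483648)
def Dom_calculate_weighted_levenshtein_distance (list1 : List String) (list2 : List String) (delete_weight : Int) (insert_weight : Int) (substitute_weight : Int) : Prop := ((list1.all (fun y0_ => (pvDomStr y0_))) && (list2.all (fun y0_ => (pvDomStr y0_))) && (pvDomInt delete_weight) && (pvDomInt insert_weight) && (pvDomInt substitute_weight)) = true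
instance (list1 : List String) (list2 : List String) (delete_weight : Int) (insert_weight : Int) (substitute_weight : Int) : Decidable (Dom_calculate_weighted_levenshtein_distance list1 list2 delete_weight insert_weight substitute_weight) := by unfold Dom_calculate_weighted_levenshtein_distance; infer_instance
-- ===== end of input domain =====

-- B replaces A's bottom-up (n1+1)×(n2+1) matrix fill by a TOP-DOWN memoized recursion over the two
-- string indices (a dict threaded through the recursive calls), and drops A's min-by-key
-- closest-match pass followed by a re-computation of its distance, taking the min of the distance
-- values directly (alternative decomposition; return values identical).

-- ===== PORT A =====
-- port of weighted_levenshtein: full matrix, two init loops, nested fill loops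
def weighted_levenshtein (str1 str2 : String) (delete_weight insert_weight substitute_weight : Int) : Int :=
  let s1 := str1.toList
  let s2 := str2.toList
  let len_str1 := s1.length
  let len_str2 := s2.length
  -- matrix = [[0] * (len_str2 + 1) for _ in range(len_str1 + 1)]
  let matrix : List (List Int) :=
    (PySem.List.pyRange 0 ((len_str1 : Int) + 1) 1).map (fun _ => List.replicate (len_str2 + 1) (0 : Int))
  -- for i in range(len_str1 + 1): matrix[i][0] = i * delete_weight
  let matrix := (PySem.List.pyRange 0 ((len_str1 : Int) + 1) 1).foldl
    (fun m i => PySem.List.pySetD m i (PySem.List.pySetD (PySem.List.pyGetD m i []) 0 (i * delete_weight))) matrix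
  -- for j in range(len_str2 + 1): matrix[0][j] = j * insert_weight
  let matrix := (PySem.List.pyRange 0 ((len_str2 : Int) + 1) 1).foldl
    (fun m j => PySem.List.pySetD m 0 (PySem.List.pySetD (PySem.List.pyGetD m 0 []) j (j * insert_weight))) matrix
  -- for i in range(1, len_str1 + 1): for j in range(1, len_str2 + 1): ...
  let matrix := (PySem.List.pyRange 1 ((len_str1 : Int) + 1) 1).foldl (fun m i =>
    (PySem.List.pyRange 1 ((len_str2 : Int) + 1) 1).foldl (fun m j =>
      let cost : Int := if PySem.List.pyGetD s1 (i - 1) ' ' = PySem.List.pyGetD s2 (j - 1) ' ' then 0 else substitute_weight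
      let v := min (min (PySem.List.pyGetD (PySem.List.pyGetD m (i - 1) []) j 0 + delete_weight)
                        (PySem.List.pyGetD (PySem.List.pyGetD m i []) (j - 1) 0 + insert_weight))
                   (PySem.List.pyGetD (PySem.List.pyGetD m (i - 1) []) (j - 1) 0 + cost)
      PySem.List.pySetD m i (PySem.List.pySetD (PySem.List.pyGetD m i []) j v)) m) matrix
  PySem.List.pyGetD (PySem.List.pyGetD matrix (len_str1 : Int) []) (len_str2 : Int) 0

def calculate_weighted_levenshtein_distance (list1 : List String) (list2 : List String) (delete_weight : Int) (insert_weight : Int) (substitute_weight : Int) : Int :=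
  list1.foldl (fun total_distance ingredient1 =>
    match PySem.List.min? list2 (fun x => weighted_levenshtein ingredient1 x delete_weight insert_weight substitute_weight) with
    | none => total_distance   -- Python raises ValueError here (list2 empty); excluded by Pre_
    | some closest_match =>
        total_distance + weighted_levenshtein ingredient1 closest_match delete_weight insert_weight substitute_weight) 0

-- ===== PORT B =====
-- port of _ld: top-down memoized recursion; the memo dict is threaded through the calls
-- (Python mutates one dict in place; here the updated dict is returned alongside the value)
def pvLd (s1 s2 : List Char) (dw iw sw : Int) :
    Nat → Nat → PySem.Dict (Nat × Nat) Int → Int × PySem.Dict (Nat × Nat) Int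
  | i, j, memo =>
    match memo.get? (i, j) with
    | some v => (v, memo)
    | none =>
      if hi : i = 0 then
        let v := (j : Int) * iw
        (v, memo.insert (i, j) v)
      else if hj : j = 0 then
        let v := (i : Int) * dw
        (v, memo.insert (i, j) v)
      else
        let r1 := pvLd s1 s2 dw iw sw (i - 1) j memo
        let r2 := pvLd s1 s2 dw iw sw i (j - 1) r1.2
        let r3 := pvLd s1 s2 dw iw sw (i - 1) (j - 1) r2.2
        let v := min (min (r1.1 + dw) (r2.1 + iw))
                     (r3.1 + (if s1.getD (i - 1) ' ' = s2.getD (j - 1) ' ' then 0 else sw))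
        (v, r3.2.insert (i, j) v)
  termination_by i j _ => i + j
  decreasing_by all_goals omega

def calculate_weighted_levenshtein_distance_alt (list1 : List String) (list2 : List String) (delete_weight : Int) (insert_weight : Int) (substitute_weight : Int) : Int :=
  list1.foldl (fun total w1 =>
    total + (match list2.map (fun w2 =>
                (pvLd w1.toList w2.toList delete_weight insert_weight substitute_weight
                  w1.toList.length w2.toList.length PySem.Dict.empty).1) with
             | [] => 0         -- Python raises ValueError here (list2 empty); excluded by Pre_
             | d :: ds => ds.foldl min d)) 0

-- ===== PRECONDITION & SPEC =====
-- Pre_ excludes only the inputs where Python A raises ValueError: list2 empty while list1 is not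
-- (min() of an empty sequence); Python B raises there too.
def Pre_calculate_weighted_levenshtein_distance (list1 : List String) (list2 : List String) (delete_weight : Int) (insert_weight : Int) (substitute_weight : Int) : Prop :=
  list1 = [] ∨ list2 ≠ []
instance (list1 : List String) (list2 : List String) (delete_weight : Int) (insert_weight : Int) (substitute_weight : Int) : Decidable (Pre_calculate_weighted_levenshtein_distance list1 list2 delete_weight insert_weight substitute_weight) := by unfold Pre_calculate_weighted_levenshtein_distance; infer_instance

def pvWitness_calculate_weighted_levenshtein_distance : List String × List String × Int × Int × Int :=
  (["cat", "dog"], ["cart", "hog"], 1, 2, 3)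

def Spec_calculate_weighted_levenshtein_distance (list1 : List String) (list2 : List String) (delete_weight : Int) (insert_weight : Int) (substitute_weight : Int) (out : Int) : Prop := out = calculate_weighted_levenshtein_distance_alt list1 list2 delete_weight insert_weight substitute_weight
instance (list1 : List String) (list2 : List String) (delete_weight : Int) (insert_weight : Int) (substitute_weight : Int) (out : Int) : Decidable (Spec_calculate_weighted_levenshtein_distance list1 list2 delete_weight insert_weight substitute_weight out) := by unfold Spec_calculate_weighted_levenshtein_distance; infer_instance

-- ===== CLAIM (what is proved, stated in full; the proofs are below) =====
def Claim_equal_calculate_weighted_levenshtein_distance : Prop := ∀ (list1 : List String) (list2 : List String) (delete_weight : Int) (insert_weight : Int) (substitute_weight : Int), Dom_calculate_weighted_levenshtein_distance list1 list2 delete_weight insert_weight substitute_weight → Pre_calculate_weighted_levenshtein_distance list1 list2 delete_weight insert_weight substitute_weight → Spec_calculate_weighted_levenshtein_distance list1 list2 delete_weight insert_weight substitute_weight (calculate_weighted_levenshtein_distance list1 list2 delete_weight insert_weight substitute_weight)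

-- ===== LEMMAS AND PROOFS =====

lemma pvFoldlStep {α : Type} (f : α → Nat → α) (A : Nat → α) (n : Nat)
    (h : ∀ j < n, f (A j) j = A (j+1)) :
    (List.range n).foldl f (A 0) = A n := by
  induction n with
  | zero => rfl
  | succ n ih =>
      rw [List.range_succ, List.foldl_append]
      rw [ih (fun j hj => h j (by omega))]
      simpa using h n (by omega)

lemma pvFoldlSetConst {α : Type} (h : Nat → α) (r0 : List α) (n : Nat) :
    (List.range n).foldl (fun r j => r.set j (h j)) r0 =
    r0.mapIdx (fun j x => if j < n then h j else x) := by
  induction n with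
  | zero => simp [List.mapIdx_eq_ofFn]
  | succ n ih =>
      rw [List.range_succ, List.foldl_append, ih]
      simp only [List.foldl_cons, List.foldl_nil]
      apply List.ext_getElem
      · simp
      · intro j h1 h2
        simp only [List.getElem_set, List.getElem_mapIdx]
        by_cases hj : n = j
        · subst hj; simp
        · simp only [if_neg hj]
          have : j < n ↔ j < n + 1 := by omega
          simp [this]

lemma pvFoldlSet {α : Type} (d : α) (g : Nat → α → α) (m0 : List α) (n : Nat) :
    (List.range n).foldl (fun m i => m.set i (g i (m.getD i d))) m0 =
    m0.mapIdx (fun i x => if i < n then g i x else x) := by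
  induction n with
  | zero => simp [List.mapIdx_eq_ofFn]
  | succ n ih =>
      rw [List.range_succ, List.foldl_append, ih]
      simp only [List.foldl_cons, List.foldl_nil]
      apply List.ext_getElem
      · simp
      · intro j h1 h2
        have h2' : j < m0.length := by simpa using h2
        simp only [List.getElem_set, List.getElem_mapIdx]
        by_cases hj : n = j
        · subst hj
          have h3 : (List.mapIdx (fun i x => if i < n then g i x else x) m0).getD n d
              = if n < n then g n (m0[n]'h2') else m0[n]'h2' := by
            rw [List.getD_eq_getElem?_getD, List.getElem?_eq_getElem (by simpa using h2')]
            simp [List.getElem_mapIdx]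
          simp [List.getElem?_eq_getElem h2']
        · simp only [if_neg hj]
          have : j < n ↔ j < n + 1 := by omega
          simp [this]

def pvD (s1 s2 : List Char) (dw iw sw : Int) : Nat → Nat → Int
  | 0, j => (j : Int) * iw
  | (i+1), 0 => ((i : Int) + 1) * dw
  | (i+1), (j+1) =>
      min (min (pvD s1 s2 dw iw sw i (j+1) + dw) (pvD s1 s2 dw iw sw (i+1) j + iw))
          (pvD s1 s2 dw iw sw i j + (if s1.getD i ' ' = s2.getD j ' ' then 0 else sw))

def pvRow (s1 s2 : List Char) (dw iw sw : Int) (i : Nat) : List Int :=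
  (List.range (s2.length + 1)).map (fun j => pvD s1 s2 dw iw sw i j)

-- the memo invariant: every stored value is the true distance of its key
def pvGood (s1 s2 : List Char) (dw iw sw : Int) (memo : PySem.Dict (Nat × Nat) Int) : Prop :=
  ∀ i j v, memo.get? (i, j) = some v → v = pvD s1 s2 dw iw sw i j

lemma pvGood_insert (s1 s2 : List Char) (dw iw sw : Int) (memo : PySem.Dict (Nat × Nat) Int)
    (i j : Nat) (hg : pvGood s1 s2 dw iw sw memo) :
    pvGood s1 s2 dw iw sw (memo.insert (i, j) (pvD s1 s2 dw iw sw i j)) := by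
  intro a b v hv
  rw [PySem.Dict.get?_insert] at hv
  split_ifs at hv with h
  · cases hv
    obtain ⟨h1, h2⟩ := Prod.mk.injEq .. ▸ h
    subst h1; subst h2; rfl
  · exact hg a b v hv

lemma pvLd_correct (s1 s2 : List Char) (dw iw sw : Int) :
    ∀ (n i j : Nat) (memo : PySem.Dict (Nat × Nat) Int), i + j ≤ n →
    pvGood s1 s2 dw iw sw memo →
    (pvLd s1 s2 dw iw sw i j memo).1 = pvD s1 s2 dw iw sw i j ∧
    pvGood s1 s2 dw iw sw (pvLd s1 s2 dw iw sw i j memo).2 := by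
  intro n
  induction n with
  | zero =>
      intro i j memo hn hg
      have hi : i = 0 := by omega
      have hj : j = 0 := by omega
      subst hi; subst hj
      rw [pvLd]
      cases hm : memo.get? (0, 0) with
      | some v =>
          exact ⟨hg 0 0 v hm, hg⟩
      | none =>
          simp only [dif_pos rfl]
          have hd : pvD s1 s2 dw iw sw 0 0 = ((0:Nat) : Int) * iw := by rw [pvD]
          exact ⟨hd.symm, hd ▸ pvGood_insert s1 s2 dw iw sw memo 0 0 hg⟩
  | succ n ih =>
      intro i j memo hn hg
      rw [pvLd]
      cases hm : memo.get? (i, j) with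
      | some v =>
          exact ⟨hg i j v hm, hg⟩
      | none =>
          by_cases hi : i = 0
          · subst hi
            simp only [dif_pos rfl]
            have hd : pvD s1 s2 dw iw sw 0 j = (j : Int) * iw := by rw [pvD]
            exact ⟨hd.symm, hd ▸ pvGood_insert s1 s2 dw iw sw memo 0 j hg⟩
          · by_cases hj : j = 0
            · subst hj
              simp only [dif_neg hi, dif_pos rfl]
              obtain ⟨i', rfl⟩ := Nat.exists_eq_succ_of_ne_zero hi
              have hd : pvD s1 s2 dw iw sw (i'+1) 0 = ((i'+1 : Nat) : Int) * dw := by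
                rw [pvD]; push_cast; ring
              exact ⟨hd.symm, hd ▸ pvGood_insert s1 s2 dw iw sw memo (i'+1) 0 hg⟩
            · simp only [dif_neg hi, dif_neg hj]
              obtain ⟨h1, hg1⟩ := ih (i-1) j memo (by omega) hg
              obtain ⟨h2, hg2⟩ := ih i (j-1) (pvLd s1 s2 dw iw sw (i-1) j memo).2 (by omega) hg1
              obtain ⟨h3, hg3⟩ := ih (i-1) (j-1)
                (pvLd s1 s2 dw iw sw i (j-1) (pvLd s1 s2 dw iw sw (i-1) j memo).2).2 (by omega) hg2
              obtain ⟨i', rfl⟩ := Nat.exists_eq_succ_of_ne_zero hi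
              obtain ⟨j', rfl⟩ := Nat.exists_eq_succ_of_ne_zero hj
              simp only [Nat.succ_sub_one, Nat.succ_eq_add_one] at h1 h2 h3 ⊢
              constructor
              · rw [h1, h2, h3, pvD]
                exact rfl
              · rw [h1, h2, h3]
                have hins := pvGood_insert s1 s2 dw iw sw _ (i'+1) (j'+1) hg3
                rw [pvD] at hins
                exact hins

lemma pvLd_eq_pvD (s1 s2 : List Char) (dw iw sw : Int) :
    (pvLd s1 s2 dw iw sw s1.length s2.length PySem.Dict.empty).1
    = pvD s1 s2 dw iw sw s1.length s2.length := by
  exact (pvLd_correct s1 s2 dw iw sw (s1.length + s2.length) s1.length s2.length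
    PySem.Dict.empty (le_refl _)
    (fun i j v hv => by rw [PySem.Dict.get?_empty] at hv; cases hv)).1

lemma pvRange0 (n : Nat) :
    PySem.List.pyRange 0 ((n : Int) + 1) 1 = (List.range (n+1)).map (fun (k : Nat) => (k : Int)) := by
  have : ((n : Int) + 1) = ((n + 1 : Nat) : Int) := by push_cast; ring
  rw [this, PySem.List.pyRange_zero_natCast]

lemma pvRange1 (n : Nat) :
    PySem.List.pyRange 1 ((n : Int) + 1) 1 = (List.range n).map (fun (k : Nat) => ((k : Int) + 1)) := by
  have h0 : (0 : Int) < (n : Int) + 1 := by positivity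
  have h2 := pvRange0 n
  rw [PySem.List.pyRange_one_cons h0, List.range_succ_eq_map, List.map_cons, List.map_map,
    List.cons.injEq] at h2
  obtain ⟨-, h2⟩ := h2
  rw [show ((0:Int)+1) = (1:Int) by ring] at h2
  rw [h2]
  apply List.map_congr_left
  intro a _
  simp only [Function.comp_apply]
  push_cast
  ring

def pvInitRow (s2 : List Char) (dw : Int) (i : Nat) : List Int :=
  ((i : Int) * dw) :: List.replicate s2.length 0

def pvMat (s1 s2 : List Char) (dw iw sw : Int) (k : Nat) : List (List Int) :=
  (List.range (s1.length + 1)).map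
    (fun i => if i ≤ k then pvRow s1 s2 dw iw sw i else pvInitRow s2 dw i)

def pvMatJ (s1 s2 : List Char) (dw iw sw : Int) (k j : Nat) : List (List Int) :=
  (List.range (s1.length + 1)).map
    (fun i => if i ≤ k then pvRow s1 s2 dw iw sw i
      else if i = k + 1 then
        (List.range (j+1)).map (pvD s1 s2 dw iw sw (k+1)) ++ List.replicate (s2.length - j) 0
      else pvInitRow s2 dw i)

lemma pvMatJ_zero (s1 s2 : List Char) (dw iw sw : Int) (k : Nat) :
    pvMatJ s1 s2 dw iw sw k 0 = pvMat s1 s2 dw iw sw k := by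
  unfold pvMatJ pvMat
  apply List.map_congr_left
  intro i _
  by_cases h1 : i ≤ k
  · simp [h1]
  · simp only [if_neg h1]
    by_cases h2 : i = k + 1
    · subst h2
      rw [if_pos rfl]
      show (List.range (0+1)).map (pvD s1 s2 dw iw sw (k+1)) ++ List.replicate (s2.length - 0) 0
          = pvInitRow s2 dw (k+1)
      rw [show (0+1) = 1 from rfl, List.range_one, List.map_singleton, pvD, pvInitRow]
      simp only [Nat.sub_zero, List.singleton_append, List.cons.injEq]
      constructor
      · push_cast; ring
      · trivial
    · simp [h2]

lemma pvMatJ_last (s1 s2 : List Char) (dw iw sw : Int) (k : Nat) :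
    pvMatJ s1 s2 dw iw sw k s2.length = pvMat s1 s2 dw iw sw (k+1) := by
  unfold pvMatJ pvMat
  apply List.map_congr_left
  intro i _
  by_cases h1 : i ≤ k
  · simp [h1, show i ≤ k + 1 by omega]
  · simp only [if_neg h1]
    by_cases h2 : i = k + 1
    · subst h2
      simp [pvRow]
    · simp [h2, show ¬ (i ≤ k + 1) by omega]

lemma pvPartial_set (s1 s2 : List Char) (dw iw sw : Int) (k j : Nat) (hj : j < s2.length) :
    ((List.range (j+1)).map (pvD s1 s2 dw iw sw (k+1)) ++ List.replicate (s2.length - j) 0).set (j+1)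
      (pvD s1 s2 dw iw sw (k+1) (j+1))
    = (List.range (j+2)).map (pvD s1 s2 dw iw sw (k+1)) ++ List.replicate (s2.length - (j+1)) 0 := by
  apply List.ext_getElem
  · simp; omega
  · intro p h1 h2
    simp only [List.getElem_set]
    by_cases hp : j + 1 = p
    · subst hp
      rw [if_pos rfl]
      rw [List.getElem_append_left (by simp)]
      simp
    · rw [if_neg hp]
      have h1' : p < (j+1) + (s2.length - j) := by simpa using h1
      by_cases hp2 : p < j + 1
      · rw [List.getElem_append_left (by simp [hp2]), List.getElem_append_left (by simp; omega)]
        simp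
      · rw [List.getElem_append_right (by simp; omega), List.getElem_append_right (by simp; omega)]
        simp

lemma pvInnerStep (s1 s2 : List Char) (dw iw sw : Int) (k j : Nat)
    (hk : k < s1.length) (hj : j < s2.length) :
    (pvMatJ s1 s2 dw iw sw k j).set (k+1)
      (((pvMatJ s1 s2 dw iw sw k j).getD (k+1) []).set (j+1)
        (min (min (((pvMatJ s1 s2 dw iw sw k j).getD k []).getD (j+1) 0 + dw)
                  (((pvMatJ s1 s2 dw iw sw k j).getD (k+1) []).getD j 0 + iw))
             (((pvMatJ s1 s2 dw iw sw k j).getD k []).getD j 0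
                + (if s1.getD k ' ' = s2.getD j ' ' then 0 else sw))))
    = pvMatJ s1 s2 dw iw sw k (j+1) := by
  have hA : (pvMatJ s1 s2 dw iw sw k j).getD k [] = pvRow s1 s2 dw iw sw k := by
    unfold pvMatJ
    rw [PySem.List.getD_map_range _ _ _ _ (by omega)]
    simp
  have hB : (pvMatJ s1 s2 dw iw sw k j).getD (k+1) []
      = (List.range (j+1)).map (pvD s1 s2 dw iw sw (k+1)) ++ List.replicate (s2.length - j) 0 := by
    unfold pvMatJ
    rw [PySem.List.getD_map_range _ _ _ _ (by omega)]
    simp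
  have hC : ∀ j', j' < s2.length + 1 → (pvRow s1 s2 dw iw sw k).getD j' 0 = pvD s1 s2 dw iw sw k j' := by
    intro j' hj'
    unfold pvRow
    rw [PySem.List.getD_map_range _ _ _ _ hj']
  have hE : ((List.range (j+1)).map (pvD s1 s2 dw iw sw (k+1)) ++ List.replicate (s2.length - j) 0).getD j 0
      = pvD s1 s2 dw iw sw (k+1) j := by
    rw [List.getD_eq_getElem _ _ (by simp; omega), List.getElem_append_left (by simp)]
    simp
  have hV : min (min (pvD s1 s2 dw iw sw k (j+1) + dw) (pvD s1 s2 dw iw sw (k+1) j + iw))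
      (pvD s1 s2 dw iw sw k j + (if s1.getD k ' ' = s2.getD j ' ' then 0 else sw))
      = pvD s1 s2 dw iw sw (k+1) (j+1) := by
    rw [pvD]
  rw [hA, hB, hC (j+1) (by omega), hC j (by omega), hE, hV, pvPartial_set s1 s2 dw iw sw k j hj]
  apply List.ext_getElem
  · simp [pvMatJ]
  · intro p h1 h2
    simp only [List.getElem_set]
    by_cases hp : k + 1 = p
    · subst hp
      rw [if_pos rfl]
      unfold pvMatJ
      rw [List.getElem_map, List.getElem_range]
      rw [if_neg (by omega), if_pos rfl]
    · rw [if_neg hp]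
      unfold pvMatJ
      rw [List.getElem_map, List.getElem_range, List.getElem_map, List.getElem_range]
      by_cases hp1 : p ≤ k
      · rw [if_pos hp1, if_pos hp1]
      · rw [if_neg hp1, if_neg hp1, if_neg (by omega), if_neg (by omega)]

lemma pvLoop2 (x : List Int) (t : List (List Int)) (h : Nat → Int) (n : Nat) :
    (List.range n).foldl (fun m j => m.set 0 ((m.getD 0 []).set j (h j))) (x :: t)
    = ((List.range n).foldl (fun r j => r.set j (h j)) x) :: t := by
  induction n with
  | zero => rfl
  | succ n ih =>
      rw [List.range_succ, List.foldl_append, List.foldl_append, ih]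
      simp

lemma pvStage1 (s1 s2 : List Char) (dw : Int) :
    List.foldl (fun x (y : Nat) => PySem.List.pySetD x (↑y) (PySem.List.pySetD (PySem.List.pyGetD x ↑y []) 0 (↑y * dw)))
      (List.map (fun _ => List.replicate (s2.length + 1) (0:Int)) (List.map (fun (k:Nat) => (k:Int)) (List.range (s1.length + 1))))
      (List.range (s1.length + 1))
    = (List.range (s1.length + 1)).map (pvInitRow s2 dw) := by
  have hf : (fun (x : List (List Int)) (y : Nat) => PySem.List.pySetD x (↑y) (PySem.List.pySetD (PySem.List.pyGetD x ↑y []) 0 (↑y * dw)))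
      = fun m k => m.set k ((m.getD k []).set 0 ((k:Int) * dw)) := by
    funext m k
    simp [pysem]
  rw [hf, List.map_map]
  rw [show ((fun (_ : Int) => List.replicate (s2.length + 1) (0:Int)) ∘ (fun (k:Nat) => (k:Int)))
      = (fun (_ : Nat) => List.replicate (s2.length + 1) (0:Int)) from rfl]
  rw [pvFoldlSet ([] : List Int) (fun i x => x.set 0 ((i:Int) * dw))]
  apply List.ext_getElem
  · simp
  · intro p h1 h2
    simp only [List.getElem_mapIdx, List.getElem_map, List.getElem_range]
    have hp : p < s1.length + 1 := by simpa using h1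
    rw [if_pos hp, pvInitRow, List.replicate_succ, List.set_cons_zero]

lemma pvStage2 (s1 s2 : List Char) (dw iw sw : Int) :
    List.foldl (fun x (y : Nat) => PySem.List.pySetD x 0 (PySem.List.pySetD (PySem.List.pyGetD x 0 []) (↑y) (↑y * iw)))
      ((List.range (s1.length + 1)).map (pvInitRow s2 dw))
      (List.range (s2.length + 1))
    = pvMat s1 s2 dw iw sw 0 := by
  have hf : (fun (x : List (List Int)) (y : Nat) => PySem.List.pySetD x 0 (PySem.List.pySetD (PySem.List.pyGetD x 0 []) (↑y) (↑y * iw)))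
      = fun m j => m.set 0 ((m.getD 0 []).set j ((j:Int) * iw)) := by
    funext m j
    simp [pysem]
  rw [hf, List.range_succ_eq_map, List.map_cons, pvLoop2, pvFoldlSetConst]
  unfold pvMat
  rw [List.range_succ_eq_map, List.map_cons, List.map_map, List.map_map]
  congr 1
  · rw [if_pos (by omega)]
    apply List.ext_getElem
    · simp [pvInitRow, pvRow]
    · intro p h1 h2
      have hp : p < s2.length + 1 := by simpa [pvInitRow] using h1
      simp only [List.getElem_mapIdx, if_pos hp]
      unfold pvRow
      rw [List.getElem_map, List.getElem_range, pvD]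

lemma pvInnerStepInt (s1 s2 : List Char) (dw iw sw : Int) (k j : Nat)
    (hk : k < s1.length) (hj : j < s2.length) :
    PySem.List.pySetD (pvMatJ s1 s2 dw iw sw k j) ((k:Int) + 1)
      (PySem.List.pySetD (PySem.List.pyGetD (pvMatJ s1 s2 dw iw sw k j) ((k:Int) + 1) []) ((j:Int) + 1)
        (min (min (PySem.List.pyGetD (PySem.List.pyGetD (pvMatJ s1 s2 dw iw sw k j) ((k:Int) + 1 - 1) []) ((j:Int) + 1) 0 + dw)
             (PySem.List.pyGetD (PySem.List.pyGetD (pvMatJ s1 s2 dw iw sw k j) ((k:Int) + 1) []) ((j:Int) + 1 - 1) 0 + iw))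
          (PySem.List.pyGetD (PySem.List.pyGetD (pvMatJ s1 s2 dw iw sw k j) ((k:Int) + 1 - 1) []) ((j:Int) + 1 - 1) 0 +
            if PySem.List.pyGetD s1 ((k:Int) + 1 - 1) ' ' = PySem.List.pyGetD s2 ((j:Int) + 1 - 1) ' ' then 0 else sw)))
    = pvMatJ s1 s2 dw iw sw k (j+1) := by
  have e1 : ((k:Int) + 1 - 1) = ((k:Nat):Int) := by ring
  have e2 : ((j:Int) + 1 - 1) = ((j:Nat):Int) := by ring
  rw [e1, e2]
  have e3 : ((k:Int) + 1) = ((k+1:Nat):Int) := by push_cast; ring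
  have e4 : ((j:Int) + 1) = ((j+1:Nat):Int) := by push_cast; ring
  rw [e3, e4]
  simp only [PySem.List.pySetD_natCast, PySem.List.pyGetD_natCast]
  exact pvInnerStep s1 s2 dw iw sw k j hk hj

lemma pvStage3 (s1 s2 : List Char) (dw iw sw : Int) :
    List.foldl (fun x (y : Nat) =>
      List.foldl (fun x (y_1 : Nat) =>
        PySem.List.pySetD x (↑y + 1)
          (PySem.List.pySetD (PySem.List.pyGetD x (↑y + 1) []) (↑y_1 + 1)
            (min
              (min (PySem.List.pyGetD (PySem.List.pyGetD x (↑y + 1 - 1) []) (↑y_1 + 1) 0 + dw)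
                (PySem.List.pyGetD (PySem.List.pyGetD x (↑y + 1) []) (↑y_1 + 1 - 1) 0 + iw))
              (PySem.List.pyGetD (PySem.List.pyGetD x (↑y + 1 - 1) []) (↑y_1 + 1 - 1) 0 +
                if PySem.List.pyGetD s1 (↑y + 1 - 1) ' ' = PySem.List.pyGetD s2 (↑y_1 + 1 - 1) ' ' then 0 else sw))))
        x (List.range s2.length))
      (pvMat s1 s2 dw iw sw 0) (List.range s1.length)
    = pvMat s1 s2 dw iw sw s1.length := by
  apply pvFoldlStep _ (pvMat s1 s2 dw iw sw) s1.length
  intro k hk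
  rw [← pvMatJ_zero, ← pvMatJ_last]
  apply pvFoldlStep _ (pvMatJ s1 s2 dw iw sw k) s2.length
  intro j hj
  exact pvInnerStepInt s1 s2 dw iw sw k j hk hj

theorem weighted_levenshtein_eq_pvD (str1 str2 : String) (dw iw sw : Int) :
    weighted_levenshtein str1 str2 dw iw sw
    = pvD str1.toList str2.toList dw iw sw str1.toList.length str2.toList.length := by
  simp only [weighted_levenshtein, pvRange0, pvRange1, List.foldl_map]
  rw [pvStage1 str1.toList str2.toList dw, pvStage2 str1.toList str2.toList dw iw sw,
    pvStage3 str1.toList str2.toList dw iw sw]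
  simp only [PySem.List.pyGetD_natCast]
  unfold pvMat
  rw [PySem.List.getD_map_range _ _ _ _ (by omega), if_pos (le_refl _)]
  unfold pvRow
  rw [PySem.List.getD_map_range _ _ _ _ (by omega)]

theorem wl_eq_pvLd (str1 str2 : String) (dw iw sw : Int) :
    weighted_levenshtein str1 str2 dw iw sw
    = (pvLd str1.toList str2.toList dw iw sw str1.toList.length str2.toList.length PySem.Dict.empty).1 := by
  rw [weighted_levenshtein_eq_pvD, pvLd_eq_pvD]

-- ===== VERDICT (by name: the statement is the Claim_ definition above) =====
theorem calculate_weighted_levenshtein_distance_spec : Claim_equal_calculate_weighted_levenshtein_distance := by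
  intro l1 l2 dw iw sw _ hpre
  unfold Spec_calculate_weighted_levenshtein_distance
  unfold calculate_weighted_levenshtein_distance calculate_weighted_levenshtein_distance_alt
  cases l2 with
  | nil =>
      cases hpre with
      | inl h => subst h; rfl
      | inr h => exact absurd rfl h
  | cons x t =>
      have hfun : (fun (total_distance : Int) (ingredient1 : String) =>
          match PySem.List.min? (x :: t) (fun y => weighted_levenshtein ingredient1 y dw iw sw) with
          | none => total_distance
          | some closest_match =>
              total_distance + weighted_levenshtein ingredient1 closest_match dw iw sw)
          = (fun (total : Int) (w1 : String) =>
          total + (match (x :: t).map (fun w2 =>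
                      (pvLd w1.toList w2.toList dw iw sw w1.toList.length w2.toList.length PySem.Dict.empty).1) with
                   | [] => 0
                   | d :: ds => ds.foldl min d)) := by
        funext acc w1
        have hk : (fun w2 => (pvLd w1.toList w2.toList dw iw sw w1.toList.length w2.toList.length PySem.Dict.empty).1)
            = fun y => weighted_levenshtein w1 y dw iw sw := by
          funext y
          rw [wl_eq_pvLd]
        rw [hk]
        cases hm : PySem.List.min? (x :: t) (fun y => weighted_levenshtein w1 y dw iw sw) with
        | none =>
            rw [PySem.List.min?_eq_none_iff] at hm
            exact absurd hm (by simp)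
        | some cm =>
            simp only [List.map_cons]
            have hmem := PySem.List.min?_mem hm
            have hmin := PySem.List.min?_isMin hm
            have hle := PySem.List.foldl_min_le (t.map (fun y => weighted_levenshtein w1 y dw iw sw))
              (weighted_levenshtein w1 x dw iw sw)
            have heq : weighted_levenshtein w1 cm dw iw sw
                = (t.map (fun y => weighted_levenshtein w1 y dw iw sw)).foldl min
                    (weighted_levenshtein w1 x dw iw sw) := by
              apply le_antisymm
              · rcases PySem.List.foldl_min_mem (t.map (fun y => weighted_levenshtein w1 y dw iw sw))
                  (weighted_levenshtein w1 x dw iw sw) with h | h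
                · rw [h]
                  exact hmin x (by simp)
                · obtain ⟨y, hy, hyv⟩ := List.mem_map.mp h
                  rw [← hyv]
                  exact hmin y (by simp [hy])
              · rcases List.mem_cons.mp hmem with h | h
                · rw [h]
                  exact hle.1
                · exact hle.2 _ (List.mem_map.mpr ⟨cm, h, rfl⟩)
            rw [heq]
      rw [hfun]
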